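-- pv_equiv track=rewrite | github.com/carnival77/Algorithm_Practice | Programmers/Level3/Kakao/구현/레벨3.셔틀버스.py | process
-- ===== SOURCE A (Python) =====
-- def process(n,t,m,timetable):
--     for time in range(540,1440,t):
--         if n==1:
--             if len(timetable)<m or timetable[0]>time:
--                 return time
--             elif len(timetable)>=m:
--                 return timetable[m-1]-1
--         bus=[]
--         for crew in timetable:
--             if crew <= time:
--                 if len(bus)<m:
--                     bus.append(crew)
--                 else:
--                     break
--         for crew in bus:
--             timetable.remove(crew)
--         n -= 1
-- ===== SOURCE B (Python) =====
-- def process(n, t, m, timetable):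
--     # Compute the last relevant bus directly (n==1 happens at bus index n-1),
--     # then drop boarders with a one-pass seat counter per earlier bus (no list.remove rescans).
--     # Does not mutate timetable (A does, via remove); equivalence is about the return value.
--     times = range(540, 1440, t)
--     if n < 1 or len(times) < n:
--         return None
--     waiting = timetable
--     for time in times[:n - 1]:
--         seats = m
--         kept = []
--         for crew in waiting:
--             if seats > 0 and crew <= time:
--                 seats -= 1
--             else:
--                 kept.append(crew)
--         waiting = kept
--     last = times[n - 1]
--     if len(waiting) < m or waiting[0] > last:
--         return last
--     return waiting[m - 1] - 1
-- ===== Notes on version B (the rewrite author's own statement) =====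
-- stated objective: faster
-- what changed: B computes the last relevant bus index directly instead of testing n==1 each lap, and drops the boarders of each earlier bus with a single-pass seat-counter partition instead of building a bus list and re-scanning the timetable with list.remove per boarded crew; B also does not mutate the timetable argument.
import Mathlib
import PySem

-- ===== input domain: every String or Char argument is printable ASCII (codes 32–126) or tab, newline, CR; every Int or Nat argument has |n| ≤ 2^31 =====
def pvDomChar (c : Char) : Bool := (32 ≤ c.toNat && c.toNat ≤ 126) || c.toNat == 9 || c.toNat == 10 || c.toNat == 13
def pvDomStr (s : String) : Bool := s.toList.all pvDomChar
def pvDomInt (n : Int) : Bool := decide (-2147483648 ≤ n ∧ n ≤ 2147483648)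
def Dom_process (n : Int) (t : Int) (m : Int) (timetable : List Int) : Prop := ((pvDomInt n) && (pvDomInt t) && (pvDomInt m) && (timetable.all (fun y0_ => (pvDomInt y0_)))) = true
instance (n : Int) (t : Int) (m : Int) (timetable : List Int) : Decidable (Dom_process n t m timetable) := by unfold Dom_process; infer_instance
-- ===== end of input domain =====

-- B replaces A's per-bus list building plus repeated list.remove rescans by computing the last
-- relevant bus directly and dropping boarders with a one-pass seat counter per earlier bus.
-- A mutates its timetable argument in place (list.remove); B does not — the equivalence proved
-- here is about the return value only.

-- ===== PORT A =====
-- inner 'for crew in timetable' loop building 'bus' (with its break)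
def collectBus (timetable : List Int) (time : Int) (m : Int) (bus : List Int) : List Int :=
  match timetable with
  | [] => bus
  | crew :: rest =>
    if crew ≤ time then
      if (bus.length : Int) < m then collectBus rest time m (bus ++ [crew])
      else bus
    else collectBus rest time m bus

-- 'for crew in bus: timetable.remove(crew)' (the element is always present, so getD never fires)
def removeStep (tt : List Int) (crew : Int) : List Int := (PySem.List.remove? tt crew).getD tt
def removeAll (timetable bus : List Int) : List Int := bus.foldl removeStep timetable

def processLoop (times : List Int) (n : Int) (m : Int) (timetable : List Int) : Option Int :=
  match times with
  | [] => none
  | time :: rest =>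
    -- rest of the loop body (bus building, removal, n -= 1)
    let step : Option Int :=
      processLoop rest (n - 1) m (removeAll timetable (collectBus timetable time m []))
    if n = 1 then
      if (timetable.length : Int) < m then some time
      else if PySem.List.pyGetD timetable 0 0 > time then some time          -- timetable[0]; index valid under Pre_ (m ≥ 1)
      else if (timetable.length : Int) ≥ m then some (PySem.List.pyGetD timetable (m - 1) 0 - 1)  -- timetable[m-1]; valid under Pre_
      else step
    else step

def process (n : Int) (t : Int) (m : Int) (timetable : List Int) : Option Int :=
  processLoop (PySem.List.pyRange 540 1440 t) n m timetable  -- range(540,1440,t); t ≠ 0 under Pre_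

-- ===== PORT B =====
-- the inner partition loop: drop 'crew' while seats remain and crew <= time, keep the rest
def keepAfterBus (time : Int) (seats : Int) (waiting : List Int) : List Int :=
  match waiting with
  | [] => []
  | crew :: rest =>
    if seats > 0 ∧ crew ≤ time then keepAfterBus time (seats - 1) rest
    else crew :: keepAfterBus time seats rest

def process_alt (n : Int) (t : Int) (m : Int) (timetable : List Int) : Option Int :=
  let times := PySem.List.pyRange 540 1440 t
  if n < 1 ∨ (times.length : Int) < n then none
  else
    let waiting := (PySem.List.slice times none (some (n - 1))).foldl
        (fun w time => keepAfterBus time m w) timetable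
    let last := PySem.List.pyGetD times (n - 1) 0          -- times[n-1]; in range by the guard
    if (waiting.length : Int) < m then some last
    else if PySem.List.pyGetD waiting 0 0 > last then some last
    else some (PySem.List.pyGetD waiting (m - 1) 0 - 1)

-- ===== PRECONDITION & SPEC =====
-- number of bus departures range(540,1440,t) produces (ceil(900/t) for positive t, else 0)
def numBuses (t : Int) : Int := if 0 < t then 899 / t + 1 else 0

-- Pre_ excludes exactly the inputs on which A raises: t = 0 (range() raises ValueError) and,
-- for a non-positive capacity m (where no crew ever boards, so the timetable never shrinks),
-- the inputs whose last relevant bus reads timetable[0] of an empty timetable or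
-- timetable[m-1] with m-1 below -len(timetable) (IndexError).
def Pre_process (n : Int) (t : Int) (m : Int) (timetable : List Int) : Prop :=
  t ≠ 0 ∧ (1 ≤ m ∨ ¬ (1 ≤ n ∧ n ≤ numBuses t) ∨
    (timetable ≠ [] ∧ (timetable.headD 0 > 540 + (n - 1) * t ∨ 1 ≤ (timetable.length : Int) + m)))
instance (n : Int) (t : Int) (m : Int) (timetable : List Int) : Decidable (Pre_process n t m timetable) := by unfold Pre_process; infer_instance
def pvWitness_process : Int × Int × Int × List Int := (2, 60, 1, [530, 600])

def Spec_process (n : Int) (t : Int) (m : Int) (timetable : List Int) (out : Option Int) : Prop := out = process_alt n t m timetable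
instance (n : Int) (t : Int) (m : Int) (timetable : List Int) (out : Option Int) : Decidable (Spec_process n t m timetable out) := by unfold Spec_process; infer_instance

-- ===== CLAIM (what is proved, stated in full; the proofs are below) =====
def Claim_equal_process : Prop := ∀ (n : Int) (t : Int) (m : Int) (timetable : List Int), Dom_process n t m timetable → Pre_process n t m timetable → Spec_process n t m timetable (process n t m timetable)

-- ===== LEMMAS AND PROOFS =====

-- first (at most) k elements of tt that are ≤ time, in order (value of A's 'bus' list)
def takeFirst (time : Int) (k : Int) (tt : List Int) : List Int :=
  match tt with
  | [] => []
  | c :: r => if c ≤ time then (if 0 < k then c :: takeFirst time (k - 1) r else []) else takeFirst time k r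

theorem collectBus_eq (time m : Int) (tt : List Int) : ∀ bus : List Int,
    collectBus tt time m bus = bus ++ takeFirst time (m - bus.length) tt := by
  induction tt with
  | nil => intro bus; simp [collectBus, takeFirst]
  | cons c r ih =>
    intro bus
    by_cases hc : c ≤ time
    · by_cases hb : (bus.length : Int) < m
      · have h0 : (0:Int) < m - bus.length := by omega
        simp only [collectBus, takeFirst, hc, hb, if_pos, ih (bus ++ [c])]
        simp [List.length_append]
        rw [if_pos hb, show m - ((bus.length : Int) + 1) = m - (bus.length : Int) - 1 from by ring]
      · simp [collectBus, takeFirst, hc, hb]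
    · simp [collectBus, takeFirst, hc, ih bus]

theorem keepAfterBus_nonpos (time : Int) (tt : List Int) : ∀ k : Int, k ≤ 0 → keepAfterBus time k tt = tt := by
  induction tt with
  | nil => intro k _; rfl
  | cons c r ih =>
    intro k hk
    simp [keepAfterBus, show ¬ (k > 0 ∧ c ≤ time) by omega, ih k hk]

theorem mem_takeFirst (time : Int) (tt : List Int) : ∀ k x, x ∈ takeFirst time k tt → x ≤ time := by
  induction tt with
  | nil => intro k x h; simp [takeFirst] at h
  | cons c r ih =>
    intro k x h
    by_cases hc : c ≤ time
    · by_cases hk : (0:Int) < k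
      · simp [takeFirst, hc, hk] at h
        rcases h with h | h
        · omega
        · exact ih _ x h
      · simp [takeFirst, hc, hk] at h
    · simp [takeFirst, hc] at h
      exact ih _ x h

theorem removeStep_cons_ne (c : Int) (r : List Int) (b : Int) (h : b ≠ c) :
    removeStep (c :: r) b = c :: removeStep r b := by
  unfold removeStep
  rw [PySem.List.remove?_cons_of_ne r (fun he => h he.symm)]
  cases PySem.List.remove? r b <;> simp

theorem foldl_removeStep_cons (B : List Int) : ∀ (c : Int) (r : List Int), (∀ b ∈ B, b ≠ c) →
    B.foldl removeStep (c :: r) = c :: B.foldl removeStep r := by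
  induction B with
  | nil => intro c r _; rfl
  | cons b B' ih =>
    intro c r h
    have hb : b ≠ c := h b (List.mem_cons_self)
    simp only [List.foldl_cons, removeStep_cons_ne c r b hb]
    exact ih c (removeStep r b) (fun x hx => h x (List.mem_cons_of_mem _ hx))

theorem foldl_takeFirst (time : Int) (tt : List Int) : ∀ k : Int,
    (takeFirst time k tt).foldl removeStep tt = keepAfterBus time k tt := by
  induction tt with
  | nil => intro k; simp [takeFirst, keepAfterBus]
  | cons c r ih =>
    intro k
    by_cases hc : c ≤ time
    · by_cases hk : (0:Int) < k
      · have hrs : removeStep (c :: r) c = r := by simp [removeStep]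
        simp [takeFirst, keepAfterBus, hc, hk, hrs, ih (k - 1)]
      · simp [takeFirst, hc, hk, keepAfterBus_nonpos time (c :: r) k (by omega)]
    · have hmem : ∀ b ∈ takeFirst time k r, b ≠ c := by
        intro b hb
        have := mem_takeFirst time r k b hb
        omega
      simp only [takeFirst, hc, ite_false]
      rw [foldl_removeStep_cons _ c r hmem, ih k]
      simp [keepAfterBus, show ¬ (k > 0 ∧ c ≤ time) by tauto]

theorem removeAll_collectBus (time m : Int) (tt : List Int) :
    removeAll tt (collectBus tt time m []) = keepAfterBus time m tt := by
  rw [collectBus_eq]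
  simp only [List.length_nil, Int.natCast_zero, sub_zero, List.nil_append]
  exact foldl_takeFirst time tt m

-- the shape of process_alt's body, for an arbitrary bus-time list
def altBody (times : List Int) (n : Int) (m : Int) (timetable : List Int) : Option Int :=
  if n < 1 ∨ (times.length : Int) < n then none
  else
    let waiting := (PySem.List.slice times none (some (n - 1))).foldl
        (fun w time => keepAfterBus time m w) timetable
    let last := PySem.List.pyGetD times (n - 1) 0
    if (waiting.length : Int) < m then some last
    else if PySem.List.pyGetD waiting 0 0 > last then some last
    else some (PySem.List.pyGetD waiting (m - 1) 0 - 1)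

theorem processLoop_eq_altBody (m : Int) (times : List Int) : ∀ (n : Int) (tt : List Int),
    processLoop times n m tt = altBody times n m tt := by
  induction times with
  | nil =>
    intro n tt
    simp only [processLoop, altBody]
    rw [if_pos (show n < 1 ∨ (([]:List Int).length : Int) < n by simp; omega)]
  | cons time rest ih =>
    intro n tt
    by_cases hn : n = 1
    · subst hn
      have hR : altBody (time :: rest) 1 m tt =
          (if (tt.length : Int) < m then some time
           else if PySem.List.pyGetD tt 0 0 > time then some time
           else some (PySem.List.pyGetD tt (m - 1) 0 - 1)) := by
        unfold altBody
        rw [if_neg (show ¬ ((1:Int) < 1 ∨ (((time :: rest).length) : Int) < 1) by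
              simp only [List.length_cons]; omega)]
        rw [show (1:Int) - 1 = 0 from by ring,
            PySem.List.slice_to (time :: rest) (show (0:Int) ≤ 0 from le_refl 0),
            PySem.List.pyGetD_zero_cons]
        simp
      rw [hR]
      simp only [processLoop]
      by_cases h1 : (tt.length : Int) < m
      · simp [h1]
      · by_cases h2 : PySem.List.pyGetD tt 0 0 > time
        · simp [h1, h2]
        · simp [h1, h2, show ((tt.length : Int)) ≥ m by omega]
    · have hstep : processLoop (time :: rest) n m tt
          = processLoop rest (n - 1) m (keepAfterBus time m tt) := by
        simp only [processLoop, if_neg hn, removeAll_collectBus]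
      rw [hstep, ih (n - 1) (keepAfterBus time m tt)]
      unfold altBody
      by_cases hd : n < 1 ∨ ((rest.length : Int)) + 1 < n
      · rw [if_pos (show n - 1 < 1 ∨ ((rest.length : Int)) < n - 1 by omega),
            if_pos (show n < 1 ∨ (((time :: rest).length) : Int) < n by
              simp only [List.length_cons]; omega)]
      · have hn2 : 2 ≤ n := by omega
        have hle : n ≤ (rest.length : Int) + 1 := by omega
        rw [if_neg (show ¬ (n - 1 < 1 ∨ ((rest.length : Int)) < n - 1) by omega),
            if_neg (show ¬ (n < 1 ∨ (((time :: rest).length) : Int) < n) by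
              simp only [List.length_cons]; omega)]
        have hW : (PySem.List.slice (time :: rest) none (some (n - 1))).foldl
              (fun w time => keepAfterBus time m w) tt
            = (PySem.List.slice rest none (some (n - 1 - 1))).foldl
              (fun w time => keepAfterBus time m w) (keepAfterBus time m tt) := by
          rw [PySem.List.slice_to (time :: rest) (show (0:Int) ≤ n - 1 by omega),
              PySem.List.slice_to rest (show (0:Int) ≤ n - 1 - 1 by omega),
              show (n - 1).toNat = (n - 1 - 1).toNat + 1 from by omega,
              List.take_succ_cons, List.foldl_cons]
        have hL : PySem.List.pyGetD (time :: rest) (n - 1) 0 = PySem.List.pyGetD rest (n - 1 - 1) 0 := by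
          obtain ⟨a, ha⟩ : ∃ a : Nat, n - 1 - 1 = (a : Int) :=
            ⟨(n - 1 - 1).toNat, by omega⟩
          rw [ha, show n - 1 = ((a + 1 : Nat) : Int) from by push_cast; omega,
              PySem.List.pyGetD_natCast, PySem.List.pyGetD_natCast, List.getD_cons_succ]
        rw [hW, hL]

-- ===== VERDICT (by name: the statement is the Claim_ definition above) =====
theorem process_spec : Claim_equal_process := by
  intro n t m timetable _hdom _hpre
  unfold Spec_process process process_alt
  exact processLoop_eq_altBody m (PySem.List.pyRange 540 1440 t) n timetable
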